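-- pv_equiv track=rewrite | github.com/kinghyeongu/LEARN_PYTHON | 12_369게임하기.py | solution
-- ===== SOURCE A (Python) =====
-- def solution(howlong):
--     sum=0
--     for i in range(1,howlong+1):
--         count=0
--         for j in str(i):
--             if j=='3' or j=='6' or j=='9':
--                 count+=1
--                 break
--         if count!=1:
--             sum+=i
--     return sum
-- ===== SOURCE B (Python) =====
-- def solution(howlong):
--     if howlong < 1:
--         return 0
--     return _cs(howlong)[1]
--
-- def _valid(m):
--     # no decimal digit of m is 3, 6 or 9
--     while m > 0:
--         if m % 10 in (3, 6, 9):
--             return False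
--         m //= 10
--     return True
--
-- def _cs(n):
--     # (count, sum) of valid numbers in [0, n], by digit DP on the last digit
--     if n < 0:
--         return (0, 0)
--     q, r = divmod(n, 10)
--     c1, s1 = _cs(q - 1)
--     # full blocks 10*q' + d, 0 <= q' < q: 7 valid digits, digit sum 27
--     c = 7 * c1
--     s = 70 * s1 + 27 * c1
--     if _valid(q):
--         for d in range(r + 1):
--             if d not in (3, 6, 9):
--                 c += 1
--                 s += 10 * q + d
--     return (c, s)
-- ===== Notes on version B (the rewrite author's own statement) =====
-- stated objective: faster
-- what changed: replaces the per-number scan of every i in 1..N (converting each i to a string to look for digits 3/6/9) by a digit-DP recursion on the last decimal digit that counts and sums all 3/6/9-free numbers at once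
import Mathlib
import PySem

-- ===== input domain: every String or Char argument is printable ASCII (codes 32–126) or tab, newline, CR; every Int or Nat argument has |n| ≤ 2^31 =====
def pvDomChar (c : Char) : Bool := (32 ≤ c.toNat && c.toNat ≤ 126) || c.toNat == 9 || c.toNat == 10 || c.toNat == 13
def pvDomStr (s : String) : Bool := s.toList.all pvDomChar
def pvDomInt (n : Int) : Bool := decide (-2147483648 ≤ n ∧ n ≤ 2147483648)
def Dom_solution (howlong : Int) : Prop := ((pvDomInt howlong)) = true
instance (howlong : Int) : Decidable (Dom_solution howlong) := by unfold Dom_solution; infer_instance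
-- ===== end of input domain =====

-- B replaces A's per-number string scan of 1..N by a digit-DP recursion on the
-- last decimal digit (faster: one O(log N)-depth recursion instead of a loop over all N numbers).


-- ===== PORT A =====
-- the inner 'for j in str(i): if j in 369: count += 1; break' loop: count is 0
-- until the first 3/6/9 character, then becomes 1 and the loop breaks
def aCount : List Char → Int
  | [] => 0
  | c :: rest => if c = '3' ∨ c = '6' ∨ c = '9' then 0 + 1 else aCount rest

def solution (howlong : Int) : Int :=
  (PySem.List.pyRange 1 (howlong + 1) 1).foldl
    (fun sum i =>
      let count := aCount (PySem.Int.toStr i).toList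
      if count ≠ 1 then sum + i else sum)
    0

-- ===== PORT B =====
-- _valid(m): while m > 0: if m % 10 in (3,6,9): return False; m //= 10; return True
def bValid (m : Int) : Bool :=
  if h : 0 < m then
    if PySem.Int.mod m 10 = 3 ∨ PySem.Int.mod m 10 = 6 ∨ PySem.Int.mod m 10 = 9 then false
    else bValid (PySem.Int.floordiv m 10)
  else true
termination_by m.toNat
decreasing_by
  rw [PySem.Int.floordiv_eq_ediv_of_pos (by omega : (0:Int) < 10)]
  omega

-- _cs(n): (count, sum) of 3/6/9-free numbers in [0, n], digit DP on the last digit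
def csB (n : Int) : Int × Int :=
  if h : n < 0 then (0, 0)
  else
    let q := PySem.Int.floordiv n 10
    let r := PySem.Int.mod n 10
    let p := csB (q - 1)
    let c := 7 * p.1
    let s := 70 * p.2 + 27 * p.1
    if bValid q then
      (PySem.List.pyRange 0 (r + 1) 1).foldl
        (fun cs d =>
          if d = 3 ∨ d = 6 ∨ d = 9 then cs else (cs.1 + 1, cs.2 + 10 * q + d))
        (c, s)
    else (c, s)
termination_by (n + 1).toNat
decreasing_by
  rw [PySem.Int.floordiv_eq_ediv_of_pos (by omega : (0:Int) < 10)]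
  omega

def solution_alt (howlong : Int) : Int :=
  if howlong < 1 then 0 else (csB howlong).2

-- ===== PRECONDITION & SPEC =====
def Spec_solution (howlong : Int) (out : Int) : Prop := out = solution_alt howlong
instance (howlong : Int) (out : Int) : Decidable (Spec_solution howlong out) := by unfold Spec_solution; infer_instance

-- ===== CLAIM (what is proved, stated in full; the proofs are below) =====
def Claim_equal_solution : Prop := ∀ (howlong : Int), Dom_solution howlong → Spec_solution howlong (solution howlong)

-- ===== LEMMAS AND PROOFS =====

-- reference (proof-side) definitions
def badD (d : Nat) : Bool := decide (d = 3 ∨ d = 6 ∨ d = 9)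

-- some decimal digit of m is 3, 6 or 9
def bad (m : Nat) : Bool :=
  if h : m = 0 then false else (badD (m % 10) || bad (m / 10))
termination_by m
decreasing_by exact Nat.div_lt_self (Nat.pos_of_ne_zero h) (by omega)

-- count / sum of 3/6/9-free numbers in [0, k)
def C : Nat → Int
  | 0 => 0
  | k + 1 => C k + (if bad k then 0 else 1)

def S : Nat → Int
  | 0 => 0
  | k + 1 => S k + (if bad k then 0 else (k : Int))

-- count / sum of 3/6/9-free digits in [0, r]
def dcnt : Nat → Int
  | 0 => 1
  | r + 1 => dcnt r + (if badD (r + 1) then 0 else 1)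

def dsum : Nat → Int
  | 0 => 0
  | r + 1 => dsum r + (if badD (r + 1) then 0 else ((r : Int) + 1))

lemma bad_zero : bad 0 = false := by rw [bad]; simp

lemma bad_eq (m : Nat) : bad m = (badD (m % 10) || bad (m / 10)) := by
  by_cases h : m = 0
  · subst h; rw [bad_zero]; decide
  · rw [bad]; simp [h]

lemma aCount_toDigitsCore (fuel : Nat) :
    ∀ n ds, n < fuel →
      aCount (Nat.toDigitsCore 10 fuel n ds) =
        if (badD (n % 10) || bad (n / 10)) then 1 else aCount ds := by
  induction fuel with
  | zero => intro n ds h; omega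
  | succ f ih =>
    intro n ds h
    rw [Nat.toDigitsCore]
    by_cases h0 : n / 10 = 0
    · rw [if_pos h0, h0, bad_zero, Bool.or_false]
      have hd : n % 10 < 10 := Nat.mod_lt _ (by omega)
      have : aCount ((n % 10).digitChar :: ds) =
          if badD (n % 10) then 1 else aCount ds := by
        interval_cases h : (n % 10) <;> simp [aCount, badD, Nat.digitChar]
      simpa using this
    · rw [if_neg h0]
      have hlt : n / 10 < f := by
        have := Nat.div_lt_self (Nat.pos_of_ne_zero (by omega : n ≠ 0)) (by omega : 1 < 10)
        omega
      rw [ih (n / 10) ((n % 10).digitChar :: ds) hlt]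
      rw [bad_eq (n / 10)]
      have hmem : aCount ((n % 10).digitChar :: ds) =
          if badD (n % 10) then 1 else aCount ds := by
        have hd : n % 10 < 10 := Nat.mod_lt _ (by omega)
        interval_cases h : (n % 10) <;> simp [aCount, badD, Nat.digitChar]
      by_cases h1 : (badD (n / 10 % 10) || bad (n / 10 / 10)) = true <;>
        by_cases h2 : badD (n % 10) = true <;>
          simp [h1, h2, hmem]

lemma aCount_toDigits (m : Nat) :
    aCount (Nat.toDigits 10 m) = if bad m then 1 else 0 := by
  rw [Nat.toDigits, aCount_toDigitsCore (m + 1) m [] (by omega), ← bad_eq]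
  simp [aCount]

lemma aCount_toChars (m : Nat) :
    aCount (PySem.Int.toChars (m : Int)) = if bad m then 1 else 0 := by
  rw [PySem.Int.toChars, if_neg (by omega : ¬ ((m : Int) < 0)), Int.toNat_natCast]
  exact aCount_toDigits m

-- A's outer loop computes S (n + 1)
lemma solutionA_eq_S (n : Nat) :
    (PySem.List.pyRange 1 ((n : Int) + 1) 1).foldl
      (fun sum i =>
        let count := aCount (PySem.Int.toStr i).toList
        if count ≠ 1 then sum + i else sum)
      0 = S (n + 1) := by
  induction n with
  | zero =>
    rw [PySem.List.pyRange_one_eq_nil (by omega)]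
    simp [S]
  | succ k ih =>
    rw [show ((k + 1 : Nat) : Int) + 1 = ((k : Int) + 1) + 1 by push_cast; ring,
      PySem.List.pyRange_one_succ_right (by omega), List.foldl_append, ih]
    simp only [List.foldl_cons, List.foldl_nil]
    rw [PySem.Int.toList_toStr, show ((k : Int) + 1) = ((k + 1 : Nat) : Int) by push_cast; ring,
      aCount_toChars (k + 1)]
    by_cases hb : bad (k + 1) = true
    · simp [hb, S]
    · simp only [Bool.not_eq_true] at hb
      simp [hb, S]
      try (push_cast; ring)

lemma badSplit (k d : Nat) (hd : d < 10) : bad (10 * k + d) = (badD d || bad k) := by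
  rw [bad_eq (10 * k + d)]
  have h1 : (10 * k + d) % 10 = d := by omega
  have h2 : (10 * k + d) / 10 = k := by omega
  rw [h1, h2]

-- digit tail of the DP: fold over range(r + 1)
lemma tail_fold (q : Int) (r : Nat) (c s : Int) :
    (PySem.List.pyRange 0 ((r : Int) + 1) 1).foldl
      (fun cs d =>
        if d = 3 ∨ d = 6 ∨ d = 9 then cs else (cs.1 + 1, cs.2 + 10 * q + d))
      (c, s) = (c + dcnt r, s + 10 * q * dcnt r + dsum r) := by
  induction r with
  | zero =>
    rw [show ((0 : Nat) : Int) + 1 = 0 + 1 by ring, PySem.List.pyRange_one_singleton]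
    simp [dcnt, dsum]
  | succ k ih =>
    rw [show ((k + 1 : Nat) : Int) + 1 = ((k : Int) + 1) + 1 by push_cast; ring,
      PySem.List.pyRange_one_succ_right (by omega), List.foldl_append, ih]
    simp only [List.foldl_cons, List.foldl_nil]
    by_cases hb : badD (k + 1) = true
    · have hd : ((k : Int) + 1 = 3 ∨ (k : Int) + 1 = 6 ∨ (k : Int) + 1 = 9) := by
        simp only [badD, decide_eq_true_iff] at hb
        omega
      rw [if_pos hd]
      simp [dcnt, dsum, hb]
    · have hd : ¬ ((k : Int) + 1 = 3 ∨ (k : Int) + 1 = 6 ∨ (k : Int) + 1 = 9) := by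
        simp only [badD, decide_eq_true_iff] at hb
        omega
      rw [if_neg hd]
      simp only [Bool.not_eq_true] at hb
      simp [dcnt, dsum, hb]
      constructor <;> push_cast <;> ring

lemma grouping_inner (k : Nat)
    (hC : C (10 * k) = 7 * C k) (hS : S (10 * k) = 70 * S k + 27 * C k) :
    ∀ r, r ≤ 9 →
      C (10 * k + r + 1) = 7 * C k + (if bad k then 0 else dcnt r) ∧
      S (10 * k + r + 1) = 70 * S k + 27 * C k +
        (if bad k then 0 else 10 * (k : Int) * dcnt r + dsum r) := by
  intro r
  induction r with
  | zero =>
    intro _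
    have hb : bad (10 * k) = bad k := by
      have h := badSplit k 0 (by omega)
      have h0 : badD 0 = false := by decide
      rw [h0, Bool.false_or] at h
      simpa using h
    refine ⟨?_, ?_⟩
    · show C (10 * k + 1) = _
      rw [C, hC, hb]
      by_cases h : bad k = true <;> simp [h, dcnt]
    · show S (10 * k + 1) = _
      rw [S, hS, hb]
      by_cases h : bad k = true <;> simp [h, dcnt, dsum] <;> push_cast <;> ring
  | succ j ihj =>
    intro hj
    obtain ⟨ihC, ihS⟩ := ihj (by omega)
    have hb : bad (10 * k + j + 1) = (badD (j + 1) || bad k) := by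
      have h := badSplit k (j + 1) (by omega)
      rwa [show 10 * k + (j + 1) = 10 * k + j + 1 by ring] at h
    refine ⟨?_, ?_⟩
    · rw [show 10 * k + (j + 1) + 1 = (10 * k + j + 1) + 1 by ring, C, ihC, hb]
      by_cases h : bad k = true <;> by_cases h2 : badD (j + 1) = true <;>
        (simp [h, h2, dcnt]; try ring)
    · rw [show 10 * k + (j + 1) + 1 = (10 * k + j + 1) + 1 by ring, S, ihS, hb]
      by_cases h : bad k = true <;> by_cases h2 : badD (j + 1) = true <;>
        (simp [h, h2, dcnt, dsum]; try (push_cast; ring))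

lemma grouping_block (k : Nat) :
    C (10 * k) = 7 * C k ∧ S (10 * k) = 70 * S k + 27 * C k := by
  induction k with
  | zero => constructor <;> simp [C, S]
  | succ j ih =>
    obtain ⟨hC9, hS9⟩ := grouping_inner j ih.1 ih.2 9 (le_refl 9)
    have hd9 : dcnt 9 = 7 := by decide
    have hs9 : dsum 9 = 27 := by decide
    rw [hd9] at hC9
    rw [hd9, hs9] at hS9
    refine ⟨?_, ?_⟩
    · rw [show 10 * (j + 1) = 10 * j + 9 + 1 by ring, hC9, C]
      by_cases h : bad j = true <;> simp [h] <;> ring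
    · rw [show 10 * (j + 1) = 10 * j + 9 + 1 by ring, hS9, S, C]
      by_cases h : bad j = true <;> simp [h] <;> push_cast <;> ring

lemma grouping (k r : Nat) (hr : r ≤ 9) :
    C (10 * k + r + 1) = 7 * C k + (if bad k then 0 else dcnt r) ∧
    S (10 * k + r + 1) = 70 * S k + 27 * C k +
      (if bad k then 0 else 10 * (k : Int) * dcnt r + dsum r) :=
  grouping_inner k (grouping_block k).1 (grouping_block k).2 r hr

lemma mod_cast10 (k : Nat) : PySem.Int.mod (k : Int) 10 = ((k % 10 : Nat) : Int) := by
  exact_mod_cast PySem.Int.mod_natCast k 10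

lemma floordiv_cast10 (k : Nat) : PySem.Int.floordiv (k : Int) 10 = ((k / 10 : Nat) : Int) := by
  exact_mod_cast PySem.Int.floordiv_natCast k 10

lemma bValid_eq (k : Nat) : bValid (k : Int) = !bad k := by
  induction k using Nat.strong_induction_on with
  | _ k ih =>
    by_cases h0 : k = 0
    · subst h0
      rw [bValid, bad]
      simp
    · rw [bValid, bad_eq k, dif_pos (by exact_mod_cast Nat.pos_of_ne_zero h0),
        mod_cast10, floordiv_cast10,
        ih (k / 10) (Nat.div_lt_self (Nat.pos_of_ne_zero h0) (by omega))]
      by_cases hb : badD (k % 10) = true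
      · have hd : (((k % 10 : Nat) : Int) = 3 ∨ ((k % 10 : Nat) : Int) = 6 ∨ ((k % 10 : Nat) : Int) = 9) := by
          simp only [badD, decide_eq_true_iff] at hb
          omega
        rw [if_pos hd]
        simp [hb]
      · have hd : ¬ (((k % 10 : Nat) : Int) = 3 ∨ ((k % 10 : Nat) : Int) = 6 ∨ ((k % 10 : Nat) : Int) = 9) := by
          simp only [badD, decide_eq_true_iff] at hb
          omega
        rw [if_neg hd]
        simp only [Bool.not_eq_true] at hb
        simp [hb]

lemma csB_eq (n : Nat) : csB (n : Int) = (C (n + 1), S (n + 1)) := by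
  induction n using Nat.strong_induction_on with
  | _ n ih =>
    rw [csB, dif_neg (by omega : ¬ ((n : Int) < 0))]
    simp only [mod_cast10, floordiv_cast10]
    have hrec : csB (((n / 10 : Nat) : Int) - 1) = (C (n / 10), S (n / 10)) := by
      by_cases hq : n / 10 = 0
      · rw [hq, show ((0 : Nat) : Int) - 1 = (-1 : Int) by rfl, csB]
        simp [C, S]
      · have h10 : 10 ≤ n := by omega
        rw [show ((n / 10 : Nat) : Int) - 1 = ((n / 10 - 1 : Nat) : Int) by omega,
          ih (n / 10 - 1) (by omega), show n / 10 - 1 + 1 = n / 10 by omega]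
    rw [hrec, bValid_eq (n / 10)]
    have hr9 : n % 10 ≤ 9 := by omega
    obtain ⟨gC, gS⟩ := grouping (n / 10) (n % 10) hr9
    rw [show n + 1 = 10 * (n / 10) + n % 10 + 1 by omega] at *
    by_cases hb : bad (n / 10) = true
    · rw [hb]
      simp only [Bool.not_true, Bool.false_eq_true, if_false]
      rw [gC, gS]
      simp [hb]
    · simp only [Bool.not_eq_true] at hb
      rw [hb]
      simp only [Bool.not_false, if_true]
      rw [tail_fold, gC, gS]
      simp [hb]
      ring

-- ===== VERDICT (by name: the statement is the Claim_ definition above) =====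
theorem solution_spec : Claim_equal_solution := by
  intro howlong _
  unfold Spec_solution solution solution_alt
  by_cases h : howlong < 1
  · rw [if_pos h, PySem.List.pyRange_one_eq_nil (by omega)]
    rfl
  · rw [if_neg h]
    have hn : howlong = ((howlong.toNat : Nat) : Int) := by omega
    rw [hn, solutionA_eq_S howlong.toNat, csB_eq howlong.toNat]
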